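-- pv_equiv track=rewrite | github.com/huggingface/accelerate | src/accelerate/utils/modeling.py | _get_param_device
-- ===== SOURCE A (Python) =====
-- def _get_param_device(param, device_map):
--     if param in device_map:
--         return device_map[param]
--     parent_param = ".".join(param.split(".")[:-1])
--     if parent_param == param:
--         raise ValueError(f"The `device_map` does not contain the module {param}.")
--     else:
--         return _get_param_device(parent_param, device_map)
-- ===== SOURCE B (Python) =====
-- def _get_param_device(param, device_map):
--     # Build the whole ancestor chain up front (param, each prefix ending just
--     # before a dot, from the rightmost dot leftward, then ""), then scan it once.
--     candidates = [param] + [param[:i] for i in range(len(param) - 1, -1, -1) if param[i] == "."] + [""]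
--     for candidate in candidates:
--         if candidate in device_map:
--             return device_map[candidate]
--     raise ValueError(f"The `device_map` does not contain the module {param}.")
-- ===== Notes on version B (the rewrite author's own statement) =====
-- stated objective: alternative
-- what changed: B replaces A's recursive re-splitting (each step re-splits the string on '.' and rejoins to form the parent) by building the whole ancestor chain once (param, each prefix ending before a dot from right to left, then "") and scanning it with a single loop.
import Mathlib
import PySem

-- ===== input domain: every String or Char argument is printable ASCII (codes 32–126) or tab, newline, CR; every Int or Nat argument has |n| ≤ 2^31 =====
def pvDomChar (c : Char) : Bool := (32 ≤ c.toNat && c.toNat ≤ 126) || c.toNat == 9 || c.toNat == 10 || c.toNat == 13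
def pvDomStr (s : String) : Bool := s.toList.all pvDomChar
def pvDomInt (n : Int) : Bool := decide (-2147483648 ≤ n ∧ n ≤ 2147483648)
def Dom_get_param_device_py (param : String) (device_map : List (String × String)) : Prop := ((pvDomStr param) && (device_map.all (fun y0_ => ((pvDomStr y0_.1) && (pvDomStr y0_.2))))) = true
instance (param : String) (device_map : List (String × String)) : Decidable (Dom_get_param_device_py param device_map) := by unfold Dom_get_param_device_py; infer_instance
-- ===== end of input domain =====

-- B builds the whole ancestor chain of `param` once and scans it with a single loop,
-- instead of A's recursion that re-splits the string on "." at every step (objective: alternative).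
-- Both programs raise ValueError when no ancestor (including "") is a key; those inputs are outside Pre_.

-- ===== PORT A =====
-- A's recursion, with a fuel guard for totality: the parent string is strictly
-- shorter than `param`, so fuel `param.toList.length + 1` is never exhausted.
def getParamDeviceGoA : Nat → String → List (String × String) → String
  | 0, _, _ => ""  -- fuel exhausted: unreachable
  | fuel+1, param, device_map =>
    match (PySem.Dict.mk device_map).get? param with
    | some v => v
    | none =>
      -- parent_param = ".".join(param.split(".")[:-1]); separator "." ≠ "" so split? is always `some`
      let parent_param : String :=
        PySem.Str.join "." (PySem.List.slice ((PySem.Str.split? param ".").getD []) none (some (-1)))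
      if parent_param = param then ""   -- raise ValueError: excluded by Pre_
      else getParamDeviceGoA fuel parent_param device_map

def get_param_device_py (param : String) (device_map : List (String × String)) : String :=
  getParamDeviceGoA (param.toList.length + 1) param device_map

-- ===== PORT B =====
-- candidates = [param] + [param[:i] for i in range(len(param) - 1, -1, -1) if param[i] == "."] + [""]
def getParamDeviceCands (param : String) : List String :=
  [param]
    ++ (PySem.List.pyRange (PySem.Str.len param - 1) (-1) (-1)).filterMap
        (fun i => if PySem.Str.pyGet? param i = some '.'
                  then some (PySem.Str.slice param none (some i)) else none)
    ++ [""]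

def getParamDeviceScan : List String → List (String × String) → String
  | [], _ => ""   -- raise ValueError: excluded by Pre_
  | candidate :: rest, device_map =>
    match (PySem.Dict.mk device_map).get? candidate with
    | some v => v
    | none => getParamDeviceScan rest device_map

def get_param_device_py_alt (param : String) (device_map : List (String × String)) : String :=
  getParamDeviceScan (getParamDeviceCands param) device_map

-- ===== PRECONDITION & SPEC =====
-- Pre_ excludes exactly the inputs where the Python A raises ValueError: those where neither
-- `param`, nor any prefix of `param` ending just before a '.', nor "" is a key of device_map.
def Pre_get_param_device_py (param : String) (device_map : List (String × String)) : Prop :=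
  ∃ p ∈ device_map.map Prod.fst,
    p = param ∨ p = "" ∨
      ∃ n ∈ List.range param.toList.length,
        param.toList[n]? = some '.' ∧ p.toList = param.toList.take n
instance (param : String) (device_map : List (String × String)) : Decidable (Pre_get_param_device_py param device_map) := by unfold Pre_get_param_device_py; infer_instance

def pvWitness_get_param_device_py : String × (List (String × String)) := ("a.b", [("a", "cpu")])

def Spec_get_param_device_py (param : String) (device_map : List (String × String)) (out : String) : Prop := out = get_param_device_py_alt param device_map
instance (param : String) (device_map : List (String × String)) (out : String) : Decidable (Spec_get_param_device_py param device_map out) := by unfold Spec_get_param_device_py; infer_instance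

-- ===== CLAIM (what is proved, stated in full; the proofs are below) =====
def Claim_equal_get_param_device_py : Prop := ∀ (param : String) (device_map : List (String × String)), Dom_get_param_device_py param device_map → Pre_get_param_device_py param device_map → Spec_get_param_device_py param device_map (get_param_device_py param device_map)

-- ===== LEMMAS AND PROOFS =====

-- Simple structural form of str.split("."): `pvSplitD pre cs` splits `cs` on '.',
-- with `pre` the characters of the current piece accumulated so far.
def pvSplitD (pre : List Char) : List Char → List (List Char)
  | [] => [pre]
  | c :: rest => if c = '.' then pre :: pvSplitD [] rest else pvSplitD (pre ++ [c]) rest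

-- `pvParent cs` = the part of `cs` before its LAST '.', or none if there is no '.'.
def pvParent : List Char → Option (List Char)
  | [] => none
  | c :: rest =>
    match pvParent rest with
    | some p => some (c :: p)
    | none => if c = '.' then some [] else none

-- The dotted prefixes of `cs` produced by B's comprehension, char-level.
def pvMid (cs : List Char) : List (List Char) :=
  (List.range cs.length).filterMap (fun k =>
    if cs[cs.length - 1 - k]? = some '.' then some (cs.take (cs.length - 1 - k)) else none)

lemma pvSplitD_ne_nil (cs : List Char) (pre : List Char) : pvSplitD pre cs ≠ [] := by
  induction cs generalizing pre with
  | nil => simp [pvSplitD]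
  | cons c rest ih =>
    by_cases hc : c = '.'
    · simp [pvSplitD, hc]
    · simpa [pvSplitD, hc] using ih (pre ++ [c])

lemma pvGo_eq (fuel : Nat) : ∀ (cs cur : List Char) (accs : List (List Char)),
    cs.length ≤ fuel →
    PySem.Chars.splitOn.go ['.'] fuel cs cur accs = accs.reverse ++ pvSplitD cur.reverse cs := by
  induction fuel with
  | zero =>
    intro cs cur accs h
    have : cs = [] := List.length_eq_zero_iff.mp (Nat.le_zero.mp h)
    subst this
    simp [PySem.Chars.splitOn.go, pvSplitD]
  | succ f ih =>
    intro cs cur accs h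
    cases cs with
    | nil => simp [PySem.Chars.splitOn.go, pvSplitD]
    | cons c rest =>
      by_cases hc : c = '.'
      · subst hc
        have hpre : List.isPrefixOf ['.'] ('.' :: rest) = true := by
          simp [List.isPrefixOf]
        simp only [PySem.Chars.splitOn.go, hpre, if_true, List.length_cons,
          List.length_nil, List.drop_succ_cons, List.drop_zero]
        rw [ih rest [] (cur.reverse :: accs) (by simpa using h)]
        simp [pvSplitD]
      · have hpre : List.isPrefixOf ['.'] (c :: rest) = false := by
          simp [List.isPrefixOf]; exact fun h' => absurd h'.symm hc
        simp only [PySem.Chars.splitOn.go, hpre]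
        rw [ih rest (c :: cur) accs (by simpa using h)]
        simp [pvSplitD, hc]

lemma pvSplitOn_eq (cs : List Char) : PySem.Chars.splitOn cs ['.'] = pvSplitD [] cs := by
  have := pvGo_eq (cs.length + 1) cs [] [] (by omega)
  simpa [PySem.Chars.splitOn] using this

lemma pvSplitD_cons_dot (pre rest) : pvSplitD pre ('.' :: rest) = pre :: pvSplitD [] rest := by
  simp [pvSplitD]

lemma pvSplitD_cons_ne (pre : List Char) (c : Char) (rest : List Char) (hc : c ≠ '.') :
    pvSplitD pre (c :: rest) = pvSplitD (pre ++ [c]) rest := by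
  simp [pvSplitD, hc]

lemma pvJoin_splitD (cs : List Char) : ∀ pre, PySem.Chars.join ['.'] (pvSplitD pre cs) = pre ++ cs := by
  induction cs with
  | nil => intro pre; simp [pvSplitD, PySem.Chars.join_singleton]
  | cons c rest ih =>
    intro pre
    by_cases hc : c = '.'
    · subst hc
      rw [pvSplitD_cons_dot]
      obtain ⟨q, l, hql⟩ : ∃ q l, pvSplitD ([] : List Char) rest = q :: l := by
        cases h : pvSplitD ([] : List Char) rest with
        | nil => exact absurd h (pvSplitD_ne_nil rest [])
        | cons q l => exact ⟨q, l, rfl⟩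
      rw [hql, PySem.Chars.join_cons_cons, ← hql, ih []]
      simp
    · rw [pvSplitD_cons_ne pre c rest hc, ih (pre ++ [c])]
      simp

lemma pvDropLast_splitD (cs : List Char) : ∀ pre,
    (pvSplitD pre cs).dropLast =
      (match pvParent cs with | none => [] | some p => pvSplitD pre p) := by
  induction cs with
  | nil => intro pre; simp [pvSplitD, pvParent]
  | cons c rest ih =>
    intro pre
    by_cases hc : c = '.'
    · subst hc
      rw [pvSplitD_cons_dot]
      obtain ⟨q, l, hql⟩ : ∃ q l, pvSplitD ([] : List Char) rest = q :: l := by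
        cases h : pvSplitD ([] : List Char) rest with
        | nil => exact absurd h (pvSplitD_ne_nil rest [])
        | cons q l => exact ⟨q, l, rfl⟩
      rw [hql, List.dropLast_cons₂, ← hql, ih []]
      cases hp : pvParent rest with
      | none => simp [pvParent, hp, pvSplitD]
      | some p => simp [pvParent, hp, pvSplitD_cons_dot]
    · rw [pvSplitD_cons_ne pre c rest hc, ih (pre ++ [c])]
      cases hp : pvParent rest with
      | none => simp [pvParent, hp, hc]
      | some p => simp [pvParent, hp, pvSplitD_cons_ne _ c _ hc]

lemma pvParent_none (cs : List Char) (h : pvParent cs = none) : '.' ∉ cs := by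
  induction cs with
  | nil => simp
  | cons c rest ih =>
    simp only [pvParent] at h
    cases hp : pvParent rest with
    | some p => rw [hp] at h; exact absurd h (by simp)
    | none =>
      rw [hp] at h
      by_cases hc : c = '.'
      · rw [if_pos hc] at h; exact absurd h (by simp)
      · rw [if_neg hc] at h
        intro hmem
        rcases List.mem_cons.mp hmem with h1 | h2
        · exact hc h1.symm
        · exact ih hp h2

lemma pvParent_some (cs : List Char) : ∀ p, pvParent cs = some p →
    ∃ t, cs = p ++ '.' :: t ∧ '.' ∉ t := by
  induction cs with
  | nil => intro p h; simp [pvParent] at h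
  | cons c rest ih =>
    intro p h
    simp only [pvParent] at h
    cases hp : pvParent rest with
    | some q =>
      rw [hp] at h
      obtain ⟨t, ht, hnt⟩ := ih q hp
      refine ⟨t, ?_, hnt⟩
      have : p = c :: q := by cases h; rfl
      simp [this, ht]
    | none =>
      rw [hp] at h
      by_cases hc : c = '.'
      · rw [if_pos hc] at h
        have : p = [] := by cases h; rfl
        subst this hc
        exact ⟨rest, rfl, pvParent_none rest hp⟩
      · rw [if_neg hc] at h; exact absurd h (by simp)

lemma pvParent_length (cs p : List Char) (h : pvParent cs = some p) : p.length < cs.length := by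
  obtain ⟨t, ht, -⟩ := pvParent_some cs p h
  subst ht
  simp

-- A's parent_param expression, characterised by pvParent.
lemma pvParentStr (param : String) :
    PySem.Str.join "." (PySem.List.slice ((PySem.Str.split? param ".").getD []) none (some (-1)))
      = String.ofList ((pvParent param.toList).getD []) := by
  have hsm := PySem.Str.split?_map param "."
  cases hsp : PySem.Str.split? param "." with
  | none =>
    rw [hsp] at hsm
    simp [PySem.Chars.split?] at hsm
  | some parts =>
    rw [hsp] at hsm
    have hparts : parts.map String.toList = PySem.Chars.splitOn param.toList ['.'] := by
      simpa [PySem.Chars.split?] using hsm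
    apply String.toList_inj.mp
    rw [String.toList_ofList]
    simp only [Option.getD_some, PySem.List.slice_to_neg_one, PySem.Str.toList_join]
    rw [show ("." : String).toList = ['.'] from by decide, List.map_dropLast, hparts,
      pvSplitOn_eq, pvDropLast_splitD]
    cases hp : pvParent param.toList with
    | none => simp [PySem.Chars.join_nil]
    | some p =>
      simp only [Option.getD_some]
      rw [pvJoin_splitD p []]
      simp

lemma pvMid_no_dot (cs : List Char) (h : '.' ∉ cs) : pvMid cs = [] := by
  unfold pvMid
  rw [List.filterMap_eq_nil_iff]
  intro k _
  have : ¬ cs[cs.length - 1 - k]? = some '.' := by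
    intro hd
    exact h (List.mem_of_getElem? hd)
  simp [this]

lemma pvMid_step (p t : List Char) (hnt : '.' ∉ t) :
    pvMid (p ++ '.' :: t) = p :: pvMid p := by
  unfold pvMid
  have hlen : (p ++ '.' :: t).length = (t.length + 1) + p.length := by simp; omega
  rw [hlen, List.range_add, List.filterMap_append, List.range_succ, List.filterMap_append,
    List.filterMap_map]
  have h1 : (List.range t.length).filterMap (fun k =>
      if (p ++ '.' :: t)[(t.length + 1) + p.length - 1 - k]? = some '.'
      then some ((p ++ '.' :: t).take ((t.length + 1) + p.length - 1 - k)) else none) = [] := by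
    rw [List.filterMap_eq_nil_iff]
    intro k hk
    have hk' : k < t.length := List.mem_range.mp hk
    have hm : (t.length + 1) + p.length - 1 - k = p.length + (t.length - k) := by omega
    have hget : (p ++ '.' :: t)[(t.length + 1) + p.length - 1 - k]? = t[t.length - k - 1]? := by
      rw [hm, List.getElem?_append_right (by omega)]
      have h2 : p.length + (t.length - k) - p.length = (t.length - k - 1) + 1 := by omega
      rw [h2]
      simp
    have hne : ¬ (p ++ '.' :: t)[(t.length + 1) + p.length - 1 - k]? = some '.' := by
      rw [hget]
      intro hd
      exact hnt (List.mem_of_getElem? hd)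
    rw [if_neg hne]
  have h2 : (List.filterMap (fun k =>
      if (p ++ '.' :: t)[(t.length + 1) + p.length - 1 - k]? = some '.'
      then some ((p ++ '.' :: t).take ((t.length + 1) + p.length - 1 - k)) else none) [t.length]) = [p] := by
    have hm : (t.length + 1) + p.length - 1 - t.length = p.length := by omega
    have hget : (p ++ '.' :: t)[p.length]? = some '.' := by
      rw [List.getElem?_append_right (le_refl _)]
      simp
    simp only [List.filterMap_cons, List.filterMap_nil, hm]
    rw [if_pos hget, List.take_left]
  have h3 : (List.range p.length).filterMap ((fun k =>
      if (p ++ '.' :: t)[(t.length + 1) + p.length - 1 - k]? = some '.'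
      then some ((p ++ '.' :: t).take ((t.length + 1) + p.length - 1 - k)) else none) ∘
        (fun x => (t.length + 1) + x)) =
      (List.range p.length).filterMap (fun k =>
        if p[p.length - 1 - k]? = some '.' then some (p.take (p.length - 1 - k)) else none) := by
    apply List.filterMap_congr
    intro k hk
    have hk' : k < p.length := List.mem_range.mp hk
    simp only [Function.comp_apply]
    rw [show (t.length + 1) + p.length - 1 - ((t.length + 1) + k) = p.length - 1 - k from by omega]
    have hlt : p.length - 1 - k < p.length := by omega
    rw [List.getElem?_append_left hlt, List.take_append_of_le_length (by omega)]
  rw [h1, h2, h3]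
  simp

-- B's candidate list, char-level.
lemma pvCands_eq (param : String) :
    getParamDeviceCands param
      = (param.toList :: (pvMid param.toList ++ [[]])).map String.ofList := by
  unfold getParamDeviceCands
  have hlen : PySem.Str.len param - 1 - (-1) = (param.toList.length : Int) := by
    rw [PySem.Str.len_eq]; omega
  rw [PySem.List.pyRange_neg_one, List.filterMap_map]
  have hmain : (List.range (PySem.Str.len param - 1 - (-1)).toNat).filterMap
      ((fun i => if PySem.Str.pyGet? param i = some '.'
            then some (PySem.Str.slice param none (some i)) else none) ∘
        (fun (k : Nat) => PySem.Str.len param - 1 - (k : Int))) =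
      (pvMid param.toList).map String.ofList := by
    have hn : (PySem.Str.len param - 1 - (-1)).toNat = param.toList.length := by
      rw [PySem.Str.len_eq]; omega
    rw [hn]
    unfold pvMid
    rw [List.map_filterMap]
    apply List.filterMap_congr
    intro k hk
    have hk' : k < param.toList.length := List.mem_range.mp hk
    have hi : PySem.Str.len param - 1 - (k : Int) = ((param.toList.length - 1 - k : Nat) : Int) := by
      rw [PySem.Str.len_eq]; omega
    simp only [Function.comp_apply]
    rw [hi]
    have hget : PySem.Str.pyGet? param ((param.toList.length - 1 - k : Nat) : Int)
        = param.toList[param.toList.length - 1 - k]? := by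
      rw [PySem.Str.pyGet?_eq]
      exact PySem.List.pyGet?_natCast _ _
    have hslice : PySem.Str.slice param none (some ((param.toList.length - 1 - k : Nat) : Int))
        = String.ofList (param.toList.take (param.toList.length - 1 - k)) := by
      apply String.toList_inj.mp
      rw [String.toList_ofList, PySem.Str.toList_slice]
      exact PySem.List.slice_to_natCast _ _
    rw [hget, hslice]
    by_cases hd : param.toList[param.toList.length - 1 - k]? = some '.'
    · rw [if_pos hd, if_pos hd, Option.map_some]
    · rw [if_neg hd, if_neg hd, Option.map_none]
  rw [hmain]
  simp [String.ofList_toList]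

lemma pvGoA_succ (f : Nat) (s : String) (dm : List (String × String)) :
    getParamDeviceGoA (f+1) s dm =
      match (PySem.Dict.mk dm).get? s with
      | some v => v
      | none =>
        if String.ofList ((pvParent s.toList).getD []) = s then ""
        else getParamDeviceGoA f (String.ofList ((pvParent s.toList).getD [])) dm := by
  simp only [getParamDeviceGoA]
  rw [pvParentStr s]

lemma pvScan_cons (c : String) (rest : List String) (dm : List (String × String)) :
    getParamDeviceScan (c :: rest) dm =
      match (PySem.Dict.mk dm).get? c with
      | some v => v
      | none => getParamDeviceScan rest dm := rfl

lemma pvGoA_empty (f : Nat) (hf : 0 < f) (dm : List (String × String)) :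
    getParamDeviceGoA f "" dm = getParamDeviceScan [""] dm := by
  obtain ⟨f', rfl⟩ : ∃ f', f = f' + 1 := ⟨f - 1, by omega⟩
  rw [pvGoA_succ, pvScan_cons]
  cases hg : (PySem.Dict.mk dm).get? "" with
  | some v => simp
  | none =>
    have hp : pvParent ([] : List Char) = none := rfl
    simp [hp, getParamDeviceScan, show String.ofList ([] : List Char) = "" from rfl]

lemma pvMain (fuel : Nat) : ∀ (s : String) (dm : List (String × String)),
    s.toList.length < fuel →
    getParamDeviceGoA fuel s dm
      = getParamDeviceScan ((s.toList :: (pvMid s.toList ++ [[]])).map String.ofList) dm := by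
  induction fuel with
  | zero => intro s dm h; exact absurd h (Nat.not_lt_zero _)
  | succ f ih =>
    intro s dm h
    rw [pvGoA_succ, List.map_cons, String.ofList_toList, pvScan_cons]
    cases hg : (PySem.Dict.mk dm).get? s with
    | some v => simp
    | none =>
      simp only
      cases hp : pvParent s.toList with
      | some p =>
        obtain ⟨t, hcs, hnt⟩ := pvParent_some s.toList p hp
        have hne : String.ofList p ≠ s := by
          intro he
          have hps : p = s.toList := by
            have h2 := congrArg String.toList he
            rwa [String.toList_ofList] at h2
          rw [hcs] at hps
          have h3 := congrArg List.length hps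
          simp at h3
        simp only [Option.getD_some, if_neg hne]
        have hplen : p.length < f := by
          have h1 : p.length < s.toList.length := pvParent_length _ _ hp
          omega
        have hmid : pvMid s.toList = p :: pvMid p := by rw [hcs]; exact pvMid_step p t hnt
        rw [hmid]
        have hih := ih (String.ofList p) dm (by rw [String.toList_ofList]; omega)
        rw [String.toList_ofList] at hih
        rw [hih]
        simp
      | none =>
        have hmid : pvMid s.toList = [] := pvMid_no_dot _ (pvParent_none _ hp)
        rw [hmid]
        simp only [Option.getD_none, List.nil_append, List.map_cons, List.map_nil]
        by_cases hse : String.ofList ([] : List Char) = s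
        · rw [if_pos hse]
          have hs0 : s = "" := hse.symm.trans rfl
          subst hs0
          show ("" : String) = getParamDeviceScan [""] dm
          simp [getParamDeviceScan, hg]
        · rw [if_neg hse]
          have hf : 0 < f := by
            have hnil : s.toList ≠ [] := by
              intro hnl
              have h2 := String.ofList_toList (s := s)
              rw [hnl] at h2
              exact hse h2
            have : 0 < s.toList.length := List.length_pos_iff.mpr hnil
            omega
          show getParamDeviceGoA f "" dm = getParamDeviceScan [""] dm
          exact pvGoA_empty f hf dm

-- ===== VERDICT (by name: the statement is the Claim_ definition above) =====
theorem get_param_device_py_spec : Claim_equal_get_param_device_py := by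
  intro param dm _ _
  unfold Spec_get_param_device_py get_param_device_py get_param_device_py_alt
  rw [pvCands_eq param]
  exact pvMain (param.toList.length + 1) param dm (by omega)
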